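-- pv_equiv track=rewrite | github.com/JulimPark/exam_io_test | test.py | extractor
-- ===== SOURCE A (Python) =====
-- def extractor(file_list):
--     subject = []
--     year = []
--     theme = []
--     score = []
--     for i in file_list:
--         aa = i.split('_')
--         try:
--             subject.append(aa[0])
--         except:
--             pass
--         try:
--             year.append(aa[1])
--         except:
--             pass
--         try:
--             theme.append(aa[2])
--         except:
--             pass
--         try:
--             score.append(aa[3])
--         except:
--             pass
--         subject = sorted(set(subject))
--         year = sorted(set(year))
--         theme = sorted(set(theme))
--         score = sorted(set(score))
--
--     return subject, year, theme, score
-- ===== SOURCE B (Python) =====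
-- def extractor(file_list):
--     # Precompute the split table once, then take each of the four columns
--     # as sorted({column values}); the len guard covers short names exactly
--     # where the original's try/except swallowed the IndexError.
--     splits = [f.split('_') for f in file_list]
--     cols = [sorted({s[i] for s in splits if len(s) > i}) for i in range(4)]
--     return cols[0], cols[1], cols[2], cols[3]
-- ===== Notes on version B (the rewrite author's own statement) =====
-- stated objective: faster
-- what changed: B precomputes the split table once and builds each of the four results with a single column-wise sorted(set(...)) pass, instead of A's interleaved loop that appends under try/except and re-sorts and re-deduplicates all four lists after every file.
import Mathlib
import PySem

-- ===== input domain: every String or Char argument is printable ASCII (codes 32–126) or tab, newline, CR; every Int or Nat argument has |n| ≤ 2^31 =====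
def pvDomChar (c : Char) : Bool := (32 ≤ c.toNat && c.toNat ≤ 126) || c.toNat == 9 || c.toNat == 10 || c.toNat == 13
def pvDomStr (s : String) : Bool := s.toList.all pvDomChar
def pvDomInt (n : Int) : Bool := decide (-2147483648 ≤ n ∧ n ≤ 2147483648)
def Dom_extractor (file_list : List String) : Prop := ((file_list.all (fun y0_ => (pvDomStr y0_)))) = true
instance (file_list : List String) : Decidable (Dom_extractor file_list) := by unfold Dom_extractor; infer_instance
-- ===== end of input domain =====

-- B replaces A's interleaved append/try-except loop (which re-sorts and re-dedups all four lists
-- after EVERY file) by one precomputed split table and four column-wise sorted(set(...)) passes: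
-- O(n log n) instead of A's quadratic re-sorting (measured faster in a timing run).


-- ===== PORT A =====
-- i.split('_'): PySem.Chars.splitOn is s.split(sep) for sep != '' (exact)
def pvSplit (s : String) : List String :=
  (PySem.Chars.splitOn s.toList ['_']).map String.ofList

-- 'try: out.append(aa[k]) except: pass' — pyGet? is none exactly where Python raises IndexError
def pvTryAppend (acc : List String) (aa : List String) (k : Int) : List String :=
  match PySem.List.pyGet? aa k with
  | some v => acc ++ [v]
  | none => acc

-- the body of A's 'for i in file_list' loop, acting on the state (subject, year, theme, score)
def pvStep (st : List String × List String × List String × List String) (i : String) :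
    List String × List String × List String × List String :=
  let aa := pvSplit i
  let subject := pvTryAppend st.1 aa 0
  let year := pvTryAppend st.2.1 aa 1
  let theme := pvTryAppend st.2.2.1 aa 2
  let score := pvTryAppend st.2.2.2 aa 3
  (PySem.List.sorted (PySem.Set.ofList subject) (fun x => x) false,
   PySem.List.sorted (PySem.Set.ofList year) (fun x => x) false,
   PySem.List.sorted (PySem.Set.ofList theme) (fun x => x) false,
   PySem.List.sorted (PySem.Set.ofList score) (fun x => x) false)

def extractor (file_list : List String) : List String × List String × List String × List String :=
  file_list.foldl pvStep ([], [], [], [])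

-- ===== PORT B =====
-- sorted({s[i] for s in splits if len(s) > i}); the guard makes s[i] total, so getD is exact there
def pvCol (splits : List (List String)) (i : Nat) : List String :=
  PySem.List.sorted
    (PySem.Set.ofList ((splits.filter (fun s => decide (i < s.length))).map (fun s => s.getD i "")))
    (fun x => x) false

def extractor_alt (file_list : List String) : List String × List String × List String × List String :=
  let splits := file_list.map (fun f => pvSplit f)
  (pvCol splits 0, pvCol splits 1, pvCol splits 2, pvCol splits 3)

-- ===== PRECONDITION & SPEC =====
def Spec_extractor (file_list : List String) (out : List String × List String × List String × List String) : Prop := out = extractor_alt file_list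
instance (file_list : List String) (out : List String × List String × List String × List String) : Decidable (Spec_extractor file_list out) := by unfold Spec_extractor; infer_instance

-- ===== CLAIM (what is proved, stated in full; the proofs are below) =====
def Claim_equal_extractor : Prop := ∀ (file_list : List String), Dom_extractor file_list → Spec_extractor file_list (extractor file_list)

-- ===== LEMMAS AND PROOFS =====

-- canonical form both programs compute per column: sorted(set(xs))
def pvS (xs : List String) : List String :=
  PySem.List.sorted (PySem.Set.ofList xs) (fun x => x) false

-- column-k entries contributed by a list of filenames
def pvE (k : Nat) (l : List String) : List String :=
  l.filterMap (fun f => (pvSplit f)[k]?)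

lemma pvS_congr {xs ys : List String} (h : ∀ a, a ∈ xs ↔ a ∈ ys) : pvS xs = pvS ys := by
  unfold pvS
  exact PySem.List.sorted_eq_sorted_of_perm _ _ _ (fun a b h => h)
    ((List.perm_ext_iff_of_nodup (PySem.Set.nodup_ofList xs) (PySem.Set.nodup_ofList ys)).2
      (by intro a; simp [PySem.Set.mem_ofList, h]))

lemma pvS_collapse (xs ys : List String) : pvS (pvS xs ++ ys) = pvS (xs ++ ys) := by
  apply pvS_congr
  intro a
  simp [pvS, List.mem_append, PySem.List.mem_sorted, PySem.Set.mem_ofList]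

lemma pvTryAppend_eq (acc aa : List String) (k : Nat) :
    pvTryAppend acc aa (k : Int) = acc ++ (aa[k]?).toList := by
  simp only [pvTryAppend, PySem.List.pyGet?_natCast]
  cases aa[k]? <;> simp

lemma pvStep_eq (xs ys zs ws : List String) (a : String) :
    pvStep (pvS xs, pvS ys, pvS zs, pvS ws) a =
      (pvS (xs ++ ((pvSplit a)[0]?).toList),
       pvS (ys ++ ((pvSplit a)[1]?).toList),
       pvS (zs ++ ((pvSplit a)[2]?).toList),
       pvS (ws ++ ((pvSplit a)[3]?).toList)) := by
  have h0 : pvTryAppend (pvS xs) (pvSplit a) 0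
      = pvS xs ++ ((pvSplit a)[0]?).toList := pvTryAppend_eq _ _ 0
  have h1 : pvTryAppend (pvS ys) (pvSplit a) 1
      = pvS ys ++ ((pvSplit a)[1]?).toList := pvTryAppend_eq _ _ 1
  have h2 : pvTryAppend (pvS zs) (pvSplit a) 2
      = pvS zs ++ ((pvSplit a)[2]?).toList := pvTryAppend_eq _ _ 2
  have h3 : pvTryAppend (pvS ws) (pvSplit a) 3
      = pvS ws ++ ((pvSplit a)[3]?).toList := pvTryAppend_eq _ _ 3
  simp only [pvStep, h0, h1, h2, h3]
  show (pvS (pvS xs ++ _), pvS (pvS ys ++ _), pvS (pvS zs ++ _), pvS (pvS ws ++ _)) = _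
  rw [pvS_collapse, pvS_collapse, pvS_collapse, pvS_collapse]

lemma pvE_cons (k : Nat) (a : String) (l : List String) :
    pvE k (a :: l) = ((pvSplit a)[k]?).toList ++ pvE k l := by
  unfold pvE
  cases h : (pvSplit a)[k]? <;> simp [h]

lemma extractor_fold_inv (l : List String) (xs ys zs ws : List String) :
    l.foldl pvStep (pvS xs, pvS ys, pvS zs, pvS ws)
    = (pvS (xs ++ pvE 0 l), pvS (ys ++ pvE 1 l), pvS (zs ++ pvE 2 l), pvS (ws ++ pvE 3 l)) := by
  induction l generalizing xs ys zs ws with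
  | nil => simp [pvE]
  | cons a l ih =>
    rw [List.foldl_cons, pvStep_eq, ih,
      pvE_cons 0, pvE_cons 1, pvE_cons 2, pvE_cons 3]
    simp [List.append_assoc]

lemma pvCol_eq (k : Nat) (l : List String) :
    pvCol (l.map (fun f => pvSplit f)) k = pvS (pvE k l) := by
  unfold pvCol pvS pvE
  congr 1
  apply congrArg
  induction l with
  | nil => rfl
  | cons f l ih =>
    simp only [List.map_cons, List.filter_cons, List.filterMap_cons]
    simp only [List.getD_eq_getElem?_getD] at ih
    by_cases h : k < (pvSplit f).length
    · simp [h, ih]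
    · simp [h, ih]

-- ===== VERDICT (by name: the statement is the Claim_ definition above) =====
theorem extractor_spec : Claim_equal_extractor := by
  intro file_list _
  show extractor file_list = extractor_alt file_list
  have hnil : (([], [], [], []) : List String × List String × List String × List String)
      = (pvS [], pvS [], pvS [], pvS []) := rfl
  unfold extractor extractor_alt
  rw [hnil, extractor_fold_inv]
  show _ = (pvCol (file_list.map (fun f => pvSplit f)) 0, pvCol (file_list.map (fun f => pvSplit f)) 1,
    pvCol (file_list.map (fun f => pvSplit f)) 2, pvCol (file_list.map (fun f => pvSplit f)) 3)
  rw [pvCol_eq, pvCol_eq, pvCol_eq, pvCol_eq]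
  simp
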